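-- pv_equiv track=rewrite | github.com/nicklanng/aoc23 | day12/part1.py | replace_unknowns
-- ===== SOURCE A (Python) =====
-- def replace_unknowns(input, binary):
--     j = 0
--     new_str = ''
--     for char in input:
--         if char == '?':
--             if binary[j] == '0':
--                 new_str += '.'
--             else:
--                 new_str += '#'
--             j += 1
--         else:
--             new_str += char
--     return new_str
-- ===== SOURCE B (Python) =====
-- def replace_unknowns(input, binary):
--     positions = [i for i, c in enumerate(input) if c == '?']
--     fill = ['.' if c == '0' else '#' for c in binary]
--     result = list(input)
--     for pos, f in zip(positions, fill):
--         result[pos] = f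
--     return ''.join(result)
-- ===== Notes on version B (the rewrite author's own statement) =====
-- stated objective: alternative
-- what changed: B replaces A's single interleaved copy-and-count loop by a locate-then-fill decomposition: it first collects the indices of all '?', precomputes the fill characters from binary, then writes them into a mutable copy of the input and joins.
import Mathlib
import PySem

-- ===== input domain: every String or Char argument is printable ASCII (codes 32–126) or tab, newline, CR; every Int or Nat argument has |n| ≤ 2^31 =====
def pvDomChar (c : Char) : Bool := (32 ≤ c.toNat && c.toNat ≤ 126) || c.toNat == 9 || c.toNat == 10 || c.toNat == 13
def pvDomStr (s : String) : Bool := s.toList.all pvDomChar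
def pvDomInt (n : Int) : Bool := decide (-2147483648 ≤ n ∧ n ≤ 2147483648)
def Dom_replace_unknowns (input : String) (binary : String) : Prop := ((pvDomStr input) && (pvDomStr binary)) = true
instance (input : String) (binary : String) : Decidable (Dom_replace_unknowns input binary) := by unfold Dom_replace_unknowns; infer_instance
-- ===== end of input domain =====

-- B replaces A's interleaved copy-and-count loop by a locate-then-fill decomposition
-- (collect '?' positions, precompute fill chars, write them into a copy); alternative structure.

-- ===== PORT A =====
-- A: one pass over input with a running index j into binary, appending char by char.
def replace_unknowns (input : String) (binary : String) : String :=
  String.ofList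
    ((input.toList.foldl
      (fun (st : Int × List Char) char =>
        if char = '?' then
          (st.1 + 1,
           st.2 ++ [if PySem.Str.pyGet? binary st.1 = some '0' then '.' else '#'])
        else (st.1, st.2 ++ [char]))
      ((0 : Int), ([] : List Char))).2)

-- ===== PORT B =====
-- B: positions of '?', fill chars from binary, then assignments into a copy of input.
def replace_unknowns_alt (input : String) (binary : String) : String :=
  String.ofList
    ((((PySem.List.enumerate input.toList).filterMap
          (fun p => if p.2 = '?' then some p.1 else none)).zip
        (binary.toList.map (fun c => if c = '0' then '.' else '#'))).foldl
      (fun r pf => PySem.List.pySetD r pf.1 pf.2) input.toList)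

-- ===== PRECONDITION & SPEC =====
-- Pre_ excludes exactly the inputs with more '?' than binary has characters, on which
-- Python A raises IndexError.
def Pre_replace_unknowns (input : String) (binary : String) : Prop :=
  input.toList.count '?' ≤ binary.toList.length
instance (input : String) (binary : String) : Decidable (Pre_replace_unknowns input binary) := by unfold Pre_replace_unknowns; infer_instance

def pvWitness_replace_unknowns : String × String := ("?a?.", "01")

def Spec_replace_unknowns (input : String) (binary : String) (out : String) : Prop := out = replace_unknowns_alt input binary
instance (input : String) (binary : String) (out : String) : Decidable (Spec_replace_unknowns input binary out) := by unfold Spec_replace_unknowns; infer_instance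


-- ===== CLAIM (what is proved, stated in full; the proofs are below) =====
def Claim_equal_replace_unknowns : Prop := ∀ (input : String) (binary : String), Dom_replace_unknowns input binary → Pre_replace_unknowns input binary → Spec_replace_unknowns input binary (replace_unknowns input binary)

-- ===== LEMMAS AND PROOFS =====

-- Common reference function: replace each '?' by the head of the remaining fill list.
def pvRepl (fill : List Char) : List Char → List Char
  | [] => []
  | c :: cs => if c = '?' then fill.headD '#' :: pvRepl fill.tail cs
               else c :: pvRepl fill cs

-- A's fold from index n produces pvRepl of the fill list from position n on.
theorem pvA_fold (binary : String) (cs : List Char) : ∀ (n : Nat) (acc : List Char),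
    (cs.foldl (fun (st : Int × List Char) char =>
      if char = '?' then
        (st.1 + 1,
         st.2 ++ [if PySem.Str.pyGet? binary st.1 = some '0' then '.' else '#'])
      else (st.1, st.2 ++ [char])) ((n : Int), acc)).2
    = acc ++ pvRepl ((binary.toList.map (fun c => if c = '0' then '.' else '#')).drop n) cs := by
  induction cs with
  | nil => intro n acc; simp [pvRepl]
  | cons c cs ih =>
    intro n acc
    by_cases hc : c = '?'
    · subst hc
      have hhead : (if PySem.Str.pyGet? binary (n : Int) = some '0' then '.' else '#')
          = ((binary.toList.map (fun c => if c = '0' then '.' else '#')).drop n).headD '#' := by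
        rw [List.headD_eq_head?_getD, List.head?_drop, List.getElem?_map,
          PySem.Str.pyGet?_natCast]
        cases h : binary.toList[n]? with
        | none => simp
        | some b => by_cases hb : b = '0' <;> simp [hb]
      have htail : ((binary.toList.map (fun c => if c = '0' then '.' else '#')).drop n).tail
          = (binary.toList.map (fun c => if c = '0' then '.' else '#')).drop (n + 1) := by
        rw [List.tail_drop]
      rw [List.foldl_cons]
      dsimp only
      rw [show ((n : Int) + 1) = ((n + 1 : Nat) : Int) by push_cast; ring, if_pos rfl, ih, hhead]
      simp [pvRepl, htail]
    · rw [List.foldl_cons]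
      dsimp only
      rw [if_neg hc, ih]
      simp [pvRepl, hc]

-- shifting all positions by one and consing a char commutes with the fold of assignments
theorem pvShiftSet (ps : List Int) : ∀ (fl cs : List Char) (c : Char),
    (∀ p ∈ ps, 0 ≤ p) →
    (((ps.map (· + 1)).zip fl).foldl (fun r pf => PySem.List.pySetD r pf.1 pf.2) (c :: cs))
    = c :: ((ps.zip fl).foldl (fun r pf => PySem.List.pySetD r pf.1 pf.2) cs) := by
  induction ps with
  | nil => intro fl cs c _; simp
  | cons p ps ih =>
    intro fl cs c hpos
    cases fl with
    | nil => simp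
    | cons v fl =>
      have hp : 0 ≤ p := hpos p (by simp)
      have hset : PySem.List.pySetD (c :: cs) (p + 1) v = c :: PySem.List.pySetD cs p v := by
        rw [PySem.List.pySetD_of_nonneg _ _ (by omega : (0:Int) ≤ p + 1),
          PySem.List.pySetD_of_nonneg _ _ hp,
          show (p + 1).toNat = p.toNat + 1 by omega]
        rfl
      simp only [List.map_cons, List.zip_cons_cons, List.foldl_cons, hset]
      exact ih fl (PySem.List.pySetD cs p v) c (fun q hq => hpos q (by simp [hq]))

-- the '?' positions starting at s + 1 are those starting at s, shifted by one
theorem pvPos_shift (cs : List Char) : ∀ (s : Int),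
    ((PySem.List.enumerate cs (s + 1)).filterMap
      (fun p => if p.2 = '?' then some p.1 else none))
    = ((PySem.List.enumerate cs s).filterMap
      (fun p => if p.2 = '?' then some p.1 else none)).map (· + 1) := by
  induction cs with
  | nil => intro s; simp [PySem.List.enumerate_nil]
  | cons c cs ih =>
    intro s
    by_cases hc : c = '?' <;>
      simp [PySem.List.enumerate_cons, hc, ih (s + 1)]

theorem pvPos_nonneg (cs : List Char) : ∀ (s : Int), 0 ≤ s →
    ∀ p ∈ (PySem.List.enumerate cs s).filterMap
      (fun p => if p.2 = '?' then some p.1 else none), 0 ≤ p := by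
  induction cs with
  | nil => intro s _ p hp; simp [PySem.List.enumerate_nil] at hp
  | cons c cs ih =>
    intro s hs p hp
    rw [PySem.List.enumerate_cons] at hp
    by_cases hc : c = '?'
    · simp only [List.filterMap_cons, hc, if_pos rfl] at hp
      rcases List.mem_cons.mp hp with h | h
      · omega
      · exact ih (s + 1) (by omega) p h
    · simp only [List.filterMap_cons, if_neg hc] at hp
      exact ih (s + 1) (by omega) p hp

-- B's locate-then-fill fold computes pvRepl when the fill list is long enough.
theorem pvB_fold (cs : List Char) : ∀ (fl : List Char), cs.count '?' ≤ fl.length →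
    ((((PySem.List.enumerate cs 0).filterMap
        (fun p => if p.2 = '?' then some p.1 else none)).zip fl).foldl
      (fun r pf => PySem.List.pySetD r pf.1 pf.2) cs)
    = pvRepl fl cs := by
  induction cs with
  | nil => intro fl _; simp [PySem.List.enumerate_nil, pvRepl]
  | cons c cs ih =>
    intro fl hlen
    have hnn := pvPos_nonneg cs 0 le_rfl
    have hps := pvPos_shift cs 0
    rw [PySem.List.enumerate_cons]
    by_cases hc : c = '?'
    · subst hc
      cases fl with
      | nil => simp [List.count_cons] at hlen
      | cons v fl =>
        rw [show (List.filterMap (fun p => if p.2 = '?' then some p.1 else none)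
            ((0, '?') :: PySem.List.enumerate cs (0 + 1)))
          = (0 :: List.filterMap (fun p => if p.2 = '?' then some p.1 else none)
            (PySem.List.enumerate cs (0 + 1))) by simp [List.filterMap_cons], hps,
          List.zip_cons_cons, List.foldl_cons]
        have h0 : PySem.List.pySetD ('?' :: cs) 0 v = v :: cs := by
          rw [PySem.List.pySetD_of_nonneg _ _ le_rfl]; rfl
        rw [h0, pvShiftSet _ fl cs v hnn,
          ih fl (by simp [List.count_cons] at hlen; omega)]
        simp [pvRepl]
    · rw [show (List.filterMap (fun p => if p.2 = '?' then some p.1 else none)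
            ((0, c) :: PySem.List.enumerate cs (0 + 1)))
          = (List.filterMap (fun p => if p.2 = '?' then some p.1 else none)
            (PySem.List.enumerate cs (0 + 1))) by simp [List.filterMap_cons, hc], hps,
        pvShiftSet _ fl cs c hnn,
        ih fl (by simpa [List.count_cons, hc] using hlen)]
      simp [pvRepl, hc]

-- ===== VERDICT (by name: the statement is the Claim_ definition above) =====
theorem replace_unknowns_spec : Claim_equal_replace_unknowns := by
  intro input binary _ hpre
  unfold Spec_replace_unknowns replace_unknowns replace_unknowns_alt
  rw [show ((0 : Int), ([] : List Char)) = (((0 : Nat) : Int), ([] : List Char)) from rfl,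
    pvA_fold, pvB_fold _ _ (by simpa using hpre)]
  simp
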